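-- pv_equiv track=rewrite | github.com/gorodtx/selection_translator_anki | dev/scripts/build_primary_language_base.py | _en_key
-- ===== SOURCE A (Python) =====
-- def _normalize_spaces(text: str) -> str:
--     return " ".join(text.split())
--
-- def _en_key(en: str) -> str | None:
--     folded = _normalize_spaces(en).casefold()
--     if not folded:
--         return None
--     # Keep only letters/digits/apostrophes and spaces.
--     tokens: list[str] = []
--     current: list[str] = []
--     for ch in folded:
--         if ch.isalnum() or ch in {"'", "’"}:
--             current.append(ch)
--             continue
--         if current:
--             tokens.append("".join(current))
--             current = []
--     if current:
--         tokens.append("".join(current))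
--
--     # Remove trailing purely-numeric tokens ("table 1" vs "table").
--     while tokens and tokens[-1].isdigit():
--         tokens.pop()
--     if not tokens:
--         return None
--     return " ".join(tokens)
-- ===== SOURCE B (Python) =====
-- def _normalize_spaces(text: str) -> str:
--     return " ".join(text.split())
--
-- def _en_key(en: str) -> str | None:
--     folded = _normalize_spaces(en).casefold()
--     if not folded:
--         return None
--     # Blank out every non-kept character, then let split() find the tokens.
--     cleaned = "".join(c if c.isalnum() or c in "'’" else " " for c in folded)
--     tokens = cleaned.split()
--     while tokens and tokens[-1].isdigit():
--         tokens.pop()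
--     if not tokens:
--         return None
--     return " ".join(tokens)
-- ===== Notes on version B (the rewrite author's own statement) =====
-- stated objective: simpler
-- what changed: Replaced the manual tokens/current accumulator state machine with a translate-then-split decomposition: non-kept characters are mapped to spaces in one pass and str.split() produces the tokens.
import Mathlib
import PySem

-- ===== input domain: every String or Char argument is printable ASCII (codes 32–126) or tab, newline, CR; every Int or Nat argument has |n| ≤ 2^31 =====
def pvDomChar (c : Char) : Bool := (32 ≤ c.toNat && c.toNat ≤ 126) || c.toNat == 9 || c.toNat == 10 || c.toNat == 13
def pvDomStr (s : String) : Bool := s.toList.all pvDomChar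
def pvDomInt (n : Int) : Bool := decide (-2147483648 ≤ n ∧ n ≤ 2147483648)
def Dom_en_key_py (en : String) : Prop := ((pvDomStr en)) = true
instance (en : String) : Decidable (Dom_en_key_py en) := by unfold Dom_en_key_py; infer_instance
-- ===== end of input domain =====

-- B replaces A's manual tokens/current accumulator state machine with a
-- translate-then-split decomposition (blank out non-kept chars, then split);
-- objective: simpler.  casefold is ported as ASCII lower (exact on Dom's ASCII strings).


-- ===== PORT A =====
-- ch.isalnum() or ch in {"'", "’"}
def pvKeep (c : Char) : Bool := PySem.Chars.isalnum c || c == '\'' || c == '’'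

-- the body of A's for-loop over (tokens, current)
def pvStep (p : List (List Char) × List Char) (ch : Char) : List (List Char) × List Char :=
  if pvKeep ch then (p.1, p.2 ++ [ch])
  else if p.2.isEmpty then p else (p.1 ++ [p.2], [])

-- the trailing 'if current: tokens.append(...)'
def pvFinish (p : List (List Char) × List Char) : List (List Char) :=
  if p.2.isEmpty then p.1 else p.1 ++ [p.2]

-- while tokens and tokens[-1].isdigit(): tokens.pop()   (identical in A and B)
def pvDropTrail : List (List Char) → List (List Char)
  | [] => []
  | t :: ts =>
    match pvDropTrail ts with
    | [] => if PySem.Chars.strIsdigit t then [] else [t]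
    | r => t :: r

def en_key_py (en : String) : Option String :=
  -- folded = _normalize_spaces(en).casefold()  (casefold = lower on ASCII Dom)
  let folded := PySem.Chars.lower (PySem.Chars.join [' '] (PySem.Chars.split₀ en.toList))
  if folded.isEmpty then none
  else
    let tokens := pvFinish (folded.foldl pvStep ([], []))
    let tokens := pvDropTrail tokens
    if tokens.isEmpty then none
    else some (String.ofList (PySem.Chars.join [' '] tokens))

-- ===== PORT B =====
def en_key_py_alt (en : String) : Option String :=
  let folded := PySem.Chars.lower (PySem.Chars.join [' '] (PySem.Chars.split₀ en.toList))
  if folded.isEmpty then none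
  else
    -- cleaned = "".join(c if c.isalnum() or c in "'’" else " " for c in folded); tokens = cleaned.split()
    let cleaned := folded.map (fun c => if pvKeep c then c else ' ')
    let tokens := pvDropTrail (PySem.Chars.split₀ cleaned)
    if tokens.isEmpty then none
    else some (String.ofList (PySem.Chars.join [' '] tokens))

-- ===== PRECONDITION & SPEC =====
def Spec_en_key_py (en : String) (out : Option String) : Prop := out = en_key_py_alt en
instance (en : String) (out : Option String) : Decidable (Spec_en_key_py en out) := by unfold Spec_en_key_py; infer_instance

-- ===== CLAIM (what is proved, stated in full; the proofs are below) =====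
def Claim_equal_en_key_py : Prop := ∀ (en : String), Dom_en_key_py en → Spec_en_key_py en (en_key_py en)

-- ===== LEMMAS AND PROOFS =====

-- a kept character is never Python whitespace
theorem keep_not_space (c : Char) (h : pvKeep c = true) : PySem.Chars.isspace c = false := by
  simp only [pvKeep, PySem.Chars.isalnum, PySem.Chars.isalpha, PySem.Chars.isdigit,
        PySem.Chars.isupper, PySem.Chars.islower, Bool.or_eq_true, decide_eq_true_eq,
        Bool.and_eq_true, beq_iff_eq, Char.le_def, UInt32.le_iff_toNat_le] at h
  rcases h with (((⟨h1,h2⟩|⟨h1,h2⟩)|⟨h1,h2⟩)|h)|h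
  all_goals try (subst h; decide)
  all_goals
    simp only [PySem.Chars.isspace, Bool.or_eq_false_iff, Bool.and_eq_false_iff,
          decide_eq_false_iff_not, not_le, Char.toNat] at h1 h2 ⊢
  all_goals revert h1 h2
  all_goals
    simp only [show ('A'.val.toNat = 65) from rfl, show ('Z'.val.toNat = 90) from rfl,
      show ('a'.val.toNat = 97) from rfl, show ('z'.val.toNat = 122) from rfl,
      show ('0'.val.toNat = 48) from rfl, show ('9'.val.toNat = 57) from rfl]
  all_goals omega

-- A's state machine over any suffix equals split₀'s scan of the blanked suffix
theorem sm_eq_split (rest : List Char) : ∀ (ts : List (List Char)) (cur : List Char),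
    pvFinish (rest.foldl pvStep (ts, cur))
      = PySem.Chars.split₀.go (rest.map (fun c => if pvKeep c then c else ' ')) cur.reverse ts.reverse := by
  induction rest with
  | nil =>
    intro ts cur
    cases cur <;> simp [pvFinish, PySem.Chars.split₀.go]
  | cons c rest ih =>
    intro ts cur
    cases hk : pvKeep c with
    | true =>
      simp only [List.map_cons, hk, if_pos, List.foldl_cons]
      rw [PySem.Chars.split₀.go, keep_not_space c hk]
      simp only [pvStep, hk, if_pos]
      simpa using ih ts (cur ++ [c])
    | false =>
      simp only [List.map_cons, hk, Bool.false_eq_true, if_false, List.foldl_cons]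
      rw [PySem.Chars.split₀.go]
      simp only [show PySem.Chars.isspace ' ' = true from rfl, if_pos]
      cases cur with
      | nil =>
        simp only [pvStep, hk, Bool.false_eq_true, if_false, List.isEmpty_nil, if_pos,
          List.reverse_nil]
        simpa using ih ts []
      | cons x xs =>
        simp only [pvStep, hk, Bool.false_eq_true, if_false, List.isEmpty_cons,
          List.reverse_cons]
        have := ih (ts ++ [x :: xs]) []
        simp only [List.reverse_nil, List.reverse_append, List.reverse_cons] at this ⊢
        simpa using this

-- ===== VERDICT (by name: the statement is the Claim_ definition above) =====
theorem en_key_py_spec : Claim_equal_en_key_py := by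
  intro en _
  show en_key_py en = en_key_py_alt en
  unfold en_key_py en_key_py_alt
  simp only []
  have h := sm_eq_split (PySem.Chars.lower (PySem.Chars.join [' '] (PySem.Chars.split₀ en.toList))) [] []
  simp only [List.reverse_nil] at h
  rw [h]
  rfl
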